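-- pv_equiv track=rewrite | github.com/marsylp/Nexus-Agent | agent_core/hooks.py | get_tool_category
-- ===== SOURCE A (Python) =====
-- TOOL_CATEGORIES: dict[str, list[str]] = {
--     "read": ["read_file", "list_dir", "calculator", "current_time",
--              "system_info", "get_env", "text_stats", "json_parse",
--              "regex_match", "csv_parse", "web_search", "http_get"],
--     "write": ["write_file", "shell", "run_python", "http_post"],
--     "shell": ["shell"],
--     "web": ["web_search", "http_get", "http_post"],
--     "spec": [],  # spec 相关工具动态添加
-- }
--
-- def get_tool_category(tool_name: str) -> set[str]:
--     """获取工具所属的分类集合"""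
--     cats = set()
--     for cat, tools in TOOL_CATEGORIES.items():
--         if tool_name in tools:
--             cats.add(cat)
--     # MCP 工具默认归为 read（安全侧）
--     if tool_name.startswith("mcp_"):
--         cats.add("read")
--     if not cats:
--         cats.add("read")  # 默认 read
--     return cats
-- ===== SOURCE B (Python) =====
-- TOOL_CATEGORIES: dict[str, list[str]] = {
--     "read": ["read_file", "list_dir", "calculator", "current_time",
--              "system_info", "get_env", "text_stats", "json_parse",
--              "regex_match", "csv_parse", "web_search", "http_get"],
--     "write": ["write_file", "shell", "run_python", "http_post"],
--     "shell": ["shell"],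
--     "web": ["web_search", "http_get", "http_post"],
--     "spec": [],
-- }
--
-- # Static inverted index: tool name -> tuple of categories containing it (built once).
-- _INDEX: dict[str, tuple[str, ...]] = {}
-- for _cat, _tools in TOOL_CATEGORIES.items():
--     for _tool in _tools:
--         _INDEX[_tool] = _INDEX.get(_tool, ()) + (_cat,)
--
--
-- def get_tool_category(tool_name: str) -> set[str]:
--     """获取工具所属的分类集合"""
--     cats = set(_INDEX.get(tool_name, ()))
--     if tool_name.startswith("mcp_"):
--         cats.add("read")
--     if not cats:
--         cats.add("read")
--     return cats
-- ===== Notes on version B (the rewrite author's own statement) =====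
-- stated objective: alternative
-- what changed: B replaces A's per-call scan over all categories' tool lists with a one-time inverted index (tool name -> categories) and a single dict lookup per call; the mcp_-prefix and empty-set default rules are unchanged.
import Mathlib
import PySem

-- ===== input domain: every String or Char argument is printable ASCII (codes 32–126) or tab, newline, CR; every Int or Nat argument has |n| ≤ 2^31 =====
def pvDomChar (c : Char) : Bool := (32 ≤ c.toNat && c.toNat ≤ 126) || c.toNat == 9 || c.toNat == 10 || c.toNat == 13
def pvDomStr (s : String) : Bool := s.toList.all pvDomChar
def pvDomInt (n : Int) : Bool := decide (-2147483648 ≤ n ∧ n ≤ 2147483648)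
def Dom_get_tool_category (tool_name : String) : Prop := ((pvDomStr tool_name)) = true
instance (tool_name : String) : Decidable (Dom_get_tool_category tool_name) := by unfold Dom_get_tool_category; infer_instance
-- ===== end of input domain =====

-- B replaces A's per-call scan over all categories with a precomputed inverted index
-- (tool name -> categories) and a single dict lookup; same return value, same post-rules.

-- ===== PORT A =====
def pvToolCategories : List (String × List String) :=
  [("read", ["read_file", "list_dir", "calculator", "current_time",
             "system_info", "get_env", "text_stats", "json_parse",
             "regex_match", "csv_parse", "web_search", "http_get"]),
   ("write", ["write_file", "shell", "run_python", "http_post"]),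
   ("shell", ["shell"]),
   ("web", ["web_search", "http_get", "http_post"]),
   ("spec", [])]

def get_tool_category (tool_name : String) : List String :=
  let cats :=
    pvToolCategories.foldl
      (fun cats p => if tool_name ∈ p.2 then PySem.Set.add cats p.1 else cats)
      PySem.Set.empty
  let cats := if PySem.Str.startswith tool_name "mcp_" then PySem.Set.add cats "read" else cats
  if cats = [] then PySem.Set.add cats "read" else cats

-- ===== PORT B =====
-- the one-time index build loop from Source B: for _cat, _tools: for _tool: _INDEX[_tool] += (_cat,)
def pvToolIndex : PySem.Dict String (List String) :=
  pvToolCategories.foldl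
    (fun d p => p.2.foldl (fun d t => d.insert t (d.getD t [] ++ [p.1])) d)
    PySem.Dict.empty

def get_tool_category_alt (tool_name : String) : List String :=
  let cats := PySem.Set.ofList (pvToolIndex.getD tool_name [])
  let cats := if PySem.Str.startswith tool_name "mcp_" then PySem.Set.add cats "read" else cats
  if cats = [] then PySem.Set.add cats "read" else cats

-- ===== PRECONDITION & SPEC =====
def Spec_get_tool_category (tool_name : String) (out : List String) : Prop := out = get_tool_category_alt tool_name
instance (tool_name : String) (out : List String) : Decidable (Spec_get_tool_category tool_name out) := by unfold Spec_get_tool_category; infer_instance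

-- ===== CLAIM (what is proved, stated in full; the proofs are below) =====
def Claim_equal_get_tool_category : Prop := ∀ (tool_name : String), Dom_get_tool_category tool_name → Spec_get_tool_category tool_name (get_tool_category tool_name)

-- ===== LEMMAS AND PROOFS =====

-- all tool names occurring in pvToolCategories (each once)
def pvAllTools : List String :=
  ["read_file", "list_dir", "calculator", "current_time", "system_info", "get_env",
   "text_stats", "json_parse", "regex_match", "csv_parse", "web_search", "http_get",
   "write_file", "shell", "run_python", "http_post"]

theorem pvToolIndex_eq :
    pvToolIndex = PySem.Dict.mk
      [("read_file", ["read"]), ("list_dir", ["read"]), ("calculator", ["read"]),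
       ("current_time", ["read"]), ("system_info", ["read"]), ("get_env", ["read"]),
       ("text_stats", ["read"]), ("json_parse", ["read"]), ("regex_match", ["read"]),
       ("csv_parse", ["read"]), ("web_search", ["read", "web"]), ("http_get", ["read", "web"]),
       ("write_file", ["write"]), ("shell", ["write", "shell"]), ("run_python", ["write"]),
       ("http_post", ["write", "web"])] := by decide

theorem pv_not_mem_case (s : String) (h : s ∉ pvAllTools) :
    get_tool_category s = get_tool_category_alt s := by
  simp only [pvAllTools, List.mem_cons, List.not_mem_nil, or_false, not_or] at h
  obtain ⟨h1, h2, h3, h4, h5, h6, h7, h8, h9, h10, h11, h12, h13, h14, h15, h16⟩ := h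
  simp only [get_tool_category, get_tool_category_alt, pvToolCategories, pvToolIndex_eq,
    List.foldl, List.mem_cons, List.not_mem_nil, or_false,
    h1, h2, h3, h4, h5, h6, h7, h8, h9, h10, h11, h12, h13, h14, h15, h16,
    or_self, if_false, PySem.Dict.getD_eq_get?_getD, PySem.Dict.get?_mk_cons,
    beq_iff_eq, Ne.symm h1, Ne.symm h2, Ne.symm h3, Ne.symm h4, Ne.symm h5, Ne.symm h6,
    Ne.symm h7, Ne.symm h8, Ne.symm h9, Ne.symm h10, Ne.symm h11, Ne.symm h12,
    Ne.symm h13, Ne.symm h14, Ne.symm h15, Ne.symm h16]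
  cases hb : PySem.Str.startswith s "mcp_" <;> simp [PySem.Set.empty, PySem.Set.ofList,
    PySem.Set.add, PySem.Dict.get?]

-- ===== VERDICT (by name: the statement is the Claim_ definition above) =====
theorem get_tool_category_spec : Claim_equal_get_tool_category := by
  intro s _
  show get_tool_category s = get_tool_category_alt s
  by_cases h : s ∈ pvAllTools
  · simp only [pvAllTools, List.mem_cons, List.not_mem_nil, or_false] at h
    rcases h with rfl|rfl|rfl|rfl|rfl|rfl|rfl|rfl|rfl|rfl|rfl|rfl|rfl|rfl|rfl|rfl <;> decide
  · exact pv_not_mem_case s h
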